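-- pv_equiv track=rewrite | github.com/Jalalvba/etl | main.py | pick_by_basename
-- ===== SOURCE A (Python) =====
-- from typing import Any, Optional, Iterable, List, Tuple, Dict, Set
--
-- GSHEET_MIME = "application/vnd.google-apps.spreadsheet"
--
-- XLSX_MIME   = "application/vnd.openxmlformats-officedocument.spreadsheetml.sheet"
--
-- def pick_by_basename(files: List[Dict[str,str]], base: str) -> Optional[Dict[str,str]]:
--     """Pick the most recent file whose name starts with base (case-insensitive). Prefer xlsx/Sheets."""
--     base = base.lower()
--     candidates = []
--     for f in files:
--         name = (f.get("name") or "").lower()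
--         if name == base or name.startswith(base + ".") or name.startswith(base + " "):
--             candidates.append(f)
--     if not candidates:  # fallback: contains
--         for f in files:
--             name = (f.get("name") or "").lower()
--             if base in name:
--                 candidates.append(f)
--     if not candidates: return None
--     # prefer xlsx/Sheets first
--     def score(f):
--         mt = f.get("mimeType","")
--         if mt == XLSX_MIME: return 0
--         if mt == GSHEET_MIME: return 1
--         return 2
--     candidates.sort(key=score)
--     return candidates[0]
-- ===== SOURCE B (Python) =====
-- from typing import Optional, List, Dict
--
-- GSHEET_MIME = "application/vnd.google-apps.spreadsheet"
-- XLSX_MIME   = "application/vnd.openxmlformats-officedocument.spreadsheetml.sheet"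
--
-- def pick_by_basename(files: List[Dict[str, str]], base: str) -> Optional[Dict[str, str]]:
--     """One pass, no sort: keep the first best-scored primary match and the
--     first best-scored contains match; prefer the primary one."""
--     b = base.lower()
--     best_primary = None    # (score, file); first minimal score wins
--     best_contains = None
--     for f in files:
--         name = (f.get("name") or "").lower()
--         if b not in name:
--             continue
--         mt = f.get("mimeType", "")
--         s = 0 if mt == XLSX_MIME else (1 if mt == GSHEET_MIME else 2)
--         primary = name == b or name.startswith(b + ".") or name.startswith(b + " ")
--         if primary and (best_primary is None or s < best_primary[0]):
--             best_primary = (s, f)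
--         if best_contains is None or s < best_contains[0]:
--             best_contains = (s, f)
--     chosen = best_primary if best_primary is not None else best_contains
--     return chosen[1] if chosen is not None else None
-- ===== Notes on version B (the rewrite author's own statement) =====
-- stated objective: alternative
-- what changed: A builds a primary-match candidate list, falls back to a contains-match list, stable-sorts the candidates by mime-type score and takes the head; B makes one pass over files keeping the first best-scored primary match and the first best-scored contains match and returns the primary one if any, with no candidate lists and no sort.
import Mathlib
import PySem

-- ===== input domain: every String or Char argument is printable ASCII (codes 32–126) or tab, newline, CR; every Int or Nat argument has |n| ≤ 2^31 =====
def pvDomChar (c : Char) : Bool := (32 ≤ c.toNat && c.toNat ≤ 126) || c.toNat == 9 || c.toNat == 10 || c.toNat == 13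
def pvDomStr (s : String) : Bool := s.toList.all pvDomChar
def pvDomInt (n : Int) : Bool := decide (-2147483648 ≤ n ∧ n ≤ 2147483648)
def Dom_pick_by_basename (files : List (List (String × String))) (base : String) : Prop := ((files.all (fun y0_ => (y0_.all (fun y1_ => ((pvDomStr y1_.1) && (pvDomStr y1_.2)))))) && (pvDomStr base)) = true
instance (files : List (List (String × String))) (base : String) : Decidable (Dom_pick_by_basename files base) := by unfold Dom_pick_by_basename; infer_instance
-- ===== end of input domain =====

-- B replaces A's two filtering passes plus a stable sort by ONE pass that keeps the
-- first best-scored primary match and the first best-scored contains match (objective: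
-- alternative); neither program observably mutates its arguments.

def pvXLSX : String := "application/vnd.openxmlformats-officedocument.spreadsheetml.sheet"
def pvGSHEET : String := "application/vnd.google-apps.spreadsheet"

-- (f.get("name") or "").lower(): the values are strings, so `or ""` only maps a missing key to ""
def pvName (f : List (String × String)) : String :=
  PySem.Str.lower (PySem.Dict.getD ⟨f⟩ "name" "")

-- A's nested `def score(f)`; B computes the same expression inline
def pvScore (f : List (String × String)) : Int :=
  let mt := PySem.Dict.getD ⟨f⟩ "mimeType" ""
  if mt == pvXLSX then 0 else if mt == pvGSHEET then 1 else 2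

-- name == base or name.startswith(base + ".") or name.startswith(base + " ")
def pvPrimary (b name : String) : Bool :=
  name == b || PySem.Str.startswith name (b ++ ".") || PySem.Str.startswith name (b ++ " ")

-- ===== PORT A =====
def pick_by_basename (files : List (List (String × String))) (base : String) :
    Option (List (String × String)) :=
  let b := PySem.Str.lower base
  let candidates := files.foldl
    (fun acc f => if pvPrimary b (pvName f) then acc ++ [f] else acc) []
  let candidates := if candidates.isEmpty then
      files.foldl (fun acc f => if PySem.Str.isIn b (pvName f) then acc ++ [f] else acc) []
    else candidates
  if candidates.isEmpty then none
  else PySem.List.pyGet? (PySem.List.sorted candidates pvScore false) 0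

-- ===== PORT B =====
def pick_by_basename_alt (files : List (List (String × String))) (base : String) :
    Option (List (String × String)) :=
  let b := PySem.Str.lower base
  let st := files.foldl
    (fun (st : Option (Int × List (String × String)) × Option (Int × List (String × String))) f =>
      if PySem.Str.isIn b (pvName f) then
        let s := pvScore f
        let bp := if pvPrimary b (pvName f) &&
            (match st.1 with | none => true | some (ms, _) => decide (s < ms))
          then some (s, f) else st.1
        let bc := if (match st.2 with | none => true | some (ms, _) => decide (s < ms))
          then some (s, f) else st.2
        (bp, bc)
      else st) (none, none)
  let chosen := if st.1.isSome then st.1 else st.2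
  chosen.map (·.2)

-- ===== PRECONDITION & SPEC =====
def Spec_pick_by_basename (files : List (List (String × String))) (base : String) (out : Option (List (String × String))) : Prop := out = pick_by_basename_alt files base
instance (files : List (List (String × String))) (base : String) (out : Option (List (String × String))) : Decidable (Spec_pick_by_basename files base out) := by unfold Spec_pick_by_basename; infer_instance

-- ===== CLAIM (what is proved, stated in full; the proofs are below) =====
def Claim_equal_pick_by_basename : Prop := ∀ (files : List (List (String × String))) (base : String), Dom_pick_by_basename files base → Spec_pick_by_basename files base (pick_by_basename files base)

-- ===== LEMMAS AND PROOFS =====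

-- the first-minimum-by-score step both programs reduce to
def pvMinStep (o : Option (List (String × String))) (f : List (String × String)) :
    Option (List (String × String)) :=
  match o with
  | none => some f
  | some m => if pvScore f < pvScore m then some f else some m

def pvTag (f : List (String × String)) : Int × List (String × String) := (pvScore f, f)

def pvTagStep (o : Option (Int × List (String × String))) (f : List (String × String)) :
    Option (Int × List (String × String)) :=
  match o with
  | none => some (pvScore f, f)
  | some (ms, mf) => if pvScore f < ms then some (pvScore f, f) else some (ms, mf)

-- a primary match is also a contains match
lemma pvPrimary_isIn (b name : String) (h : pvPrimary b name = true) :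
    PySem.Str.isIn b name = true := by
  rw [PySem.Str.isIn_iff_infix]
  simp only [pvPrimary, Bool.or_eq_true, beq_iff_eq, PySem.Str.startswith_eq,
    PySem.Chars.startswith_iff, String.toList_append] at h
  rcases h with (h | h) | h
  · subst h; exact List.infix_refl _
  · exact ((List.prefix_append b.toList _).trans h).isInfix
  · exact ((List.prefix_append b.toList _).trans h).isInfix

lemma pyGet?_zero (l : List (List (String × String))) : PySem.List.pyGet? l 0 = l.head? := by
  cases l <;> simp [PySem.List.pyGet?, PySem.List.pyIdx?]

-- head of insertBy(<) is the first-min step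
lemma head?_insertBy (key : List (String × String) → Int) (x : List (String × String))
    (ys : List (List (String × String))) :
    (PySem.List.insertBy (fun a b => decide (key a < key b)) x ys).head? =
      (match ys.head? with
        | none => some x
        | some y => if key x < key y then some x else some y) := by
  cases ys with
  | nil => simp [PySem.List.insertBy]
  | cons y t =>
    simp only [PySem.List.insertBy]
    by_cases h : key x < key y <;> simp [h]

lemma head?_foldl_insertBy (key : List (String × String) → Int) :
    ∀ (xs acc : List (List (String × String))),
      ((xs.foldl (fun a x => PySem.List.insertBy (fun a b => decide (key a < key b)) x a) acc).head?) =
      xs.foldl (fun o x =>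
        (match o with
          | none => some x
          | some m => if key x < key m then some x else some m)) acc.head? := by
  intro xs
  induction xs with
  | nil => intro acc; rfl
  | cons x t ih =>
    intro acc
    simp only [List.foldl_cons, ih, head?_insertBy]

-- A's sorted-head equals the first-min fold
lemma pyGet?_sorted_zero (xs : List (List (String × String))) :
    PySem.List.pyGet? (PySem.List.sorted xs pvScore false) 0 = xs.foldl pvMinStep none := by
  rw [pyGet?_zero, PySem.List.sorted_eq_foldl_insertBy, head?_foldl_insertBy]
  rfl

lemma foldl_tagStep (xs : List (List (String × String))) :
    ∀ (o : Option (List (String × String))),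
      xs.foldl pvTagStep (o.map pvTag) = (xs.foldl pvMinStep o).map pvTag := by
  induction xs with
  | nil => intro o; rfl
  | cons x t ih =>
    intro o
    simp only [List.foldl_cons]
    have h : pvTagStep (o.map pvTag) x = (pvMinStep o x).map pvTag := by
      cases o with
      | none => rfl
      | some m =>
        simp only [Option.map_some, pvTag, pvTagStep, pvMinStep]
        split <;> simp_all [pvTag]
    rw [h, ih]

-- B's single pass computes the tagged first-min of both filtered lists
lemma bfold (P C : List (String × String) → Bool) (files : List (List (String × String))) :
    ∀ st, files.foldl
      (fun (st : Option (Int × List (String × String)) × Option (Int × List (String × String))) f =>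
        if C f then
          let s := pvScore f
          let bp := if P f &&
              (match st.1 with | none => true | some (ms, _) => decide (s < ms))
            then some (s, f) else st.1
          let bc := if (match st.2 with | none => true | some (ms, _) => decide (s < ms))
            then some (s, f) else st.2
          (bp, bc)
        else st) st =
      ((files.filter (fun f => C f && P f)).foldl pvTagStep st.1,
       (files.filter C).foldl pvTagStep st.2) := by
  induction files with
  | nil => intro st; rfl
  | cons f t ih =>
    intro st
    obtain ⟨o1, o2⟩ := st
    rw [List.foldl_cons, ih]
    by_cases hC : C f = true <;>
      by_cases hP : P f = true <;>
      cases o1 <;> cases o2 <;>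
      simp [hC, hP, pvTagStep]

lemma filter_contains_and_primary (b : String) (files : List (List (String × String))) :
    files.filter (fun f => PySem.Str.isIn b (pvName f) && pvPrimary b (pvName f)) =
      files.filter (fun f => pvPrimary b (pvName f)) := by
  apply List.filter_congr
  intro f _
  cases hP : pvPrimary b (pvName f)
  · simp
  · rw [pvPrimary_isIn b (pvName f) hP]; rfl

lemma minFold_some_isSome : ∀ (t : List (List (String × String))) (m : List (String × String)),
    (t.foldl pvMinStep (some m)).isSome = true := by
  intro t
  induction t with
  | nil => intro m; rfl
  | cons x s ih =>
    intro m
    simp only [List.foldl_cons, pvMinStep]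
    split <;> exact ih _

lemma if_isEmpty_minFold (xs : List (List (String × String))) :
    (if xs.isEmpty then none else xs.foldl pvMinStep none) = xs.foldl pvMinStep none := by
  cases xs <;> simp

-- ===== VERDICT (by name: the statement is the Claim_ definition above) =====
theorem pick_by_basename_spec : Claim_equal_pick_by_basename := by
  intro files base _
  unfold Spec_pick_by_basename
  simp only [pick_by_basename, pick_by_basename_alt]
  rw [bfold (fun f => pvPrimary (PySem.Str.lower base) (pvName f))
        (fun f => PySem.Str.isIn (PySem.Str.lower base) (pvName f)) files (none, none)]
  simp only [PySem.List.foldl_append_if_eq_filter, List.nil_append,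
    filter_contains_and_primary, pyGet?_sorted_zero]
  rw [show (none : Option (Int × List (String × String))) =
        Option.map pvTag (none : Option (List (String × String))) from rfl]
  rw [foldl_tagStep, foldl_tagStep]
  set c0 := files.filter (fun f => pvPrimary (PySem.Str.lower base) (pvName f)) with hc0
  set c1 := files.filter (fun f => PySem.Str.isIn (PySem.Str.lower base) (pvName f)) with hc1
  have hmap : ∀ (o : Option (List (String × String))),
      (o.map pvTag).map (·.2) = o := by intro o; cases o <;> simp [pvTag]
  cases h0 : c0 with
  | nil =>
    simp only [List.isEmpty_nil, if_true, List.foldl_nil, Option.map_none, Option.isSome_none,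
      Bool.false_eq_true, if_false, hmap, if_isEmpty_minFold]
  | cons x t =>
    have hs : ((x :: t).foldl pvMinStep none).isSome = true := by
      rw [List.foldl_cons]; exact minFold_some_isSome t x
    simp only [List.isEmpty_cons, if_false, Bool.false_eq_true, Option.isSome_map, hs, if_true,
      hmap]
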